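-- pv_equiv track=rewrite | github.com/WCC-Tech-Club/PiArcade | arcadeUtils.py | gen_sprite_list
-- ===== SOURCE A (Python) =====
-- def gen_sprite_list(numSprites, numSpritesPerRow, spriteXSize, spriteYSize, StartRow):
-- 	#Generates locations of sprites on a sprite sheet given certian values, output
-- 	#can then be fed to the spriteSheet.images_at function as the first argument
--
-- 	# numSpritesPerRow: self expl.
-- 	# numSprites: self expl.
-- 	# spriteYSize: self expl.
-- 	# spriteXSize: self expl.
-- 	# colorKey: self expl.
-- 	# StartRow: Row the sprite starts on within the file (0 Based)
-- 	#
--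
--
-- 	i = 0 #iteration
-- 	currRowOnSprite = 0 #Sprite within the current row its iterating on
-- 	currRow = StartRow #Row it's iterating on, starting with arg
-- 	currSpriteSheet = [] #Array of tuples of the locations of all the sprites, generated
-- 	while i < numSprites:
-- 		if currRowOnSprite < numSpritesPerRow:
-- 			currSpriteSheet.append(((currRowOnSprite*spriteXSize),(currRow*spriteYSize),spriteXSize,spriteYSize))
-- 			i +=1
-- 			currRowOnSprite +=1
-- 		else:
-- 			currRowOnSprite = 0
-- 			currRow +=1
-- 	return currSpriteSheet
-- ===== SOURCE B (Python) =====
-- def gen_sprite_list(numSprites, numSpritesPerRow, spriteXSize, spriteYSize, StartRow):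
-- 	# Derive each sprite's grid cell directly from its index with divmod:
-- 	# no running row/column state variables, no reset branch.
-- 	return [
-- 		((i % numSpritesPerRow) * spriteXSize,
-- 		 (StartRow + i // numSpritesPerRow) * spriteYSize,
-- 		 spriteXSize,
-- 		 spriteYSize)
-- 		for i in range(numSprites)
-- 	]
-- ===== Notes on version B (the rewrite author's own statement) =====
-- stated objective: simpler
-- what changed: Replaced the stateful while-loop (i/currRowOnSprite/currRow counters with an else-branch row reset) by a single range comprehension that computes each cell directly as i % numSpritesPerRow and StartRow + i // numSpritesPerRow.
import Mathlib
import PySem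

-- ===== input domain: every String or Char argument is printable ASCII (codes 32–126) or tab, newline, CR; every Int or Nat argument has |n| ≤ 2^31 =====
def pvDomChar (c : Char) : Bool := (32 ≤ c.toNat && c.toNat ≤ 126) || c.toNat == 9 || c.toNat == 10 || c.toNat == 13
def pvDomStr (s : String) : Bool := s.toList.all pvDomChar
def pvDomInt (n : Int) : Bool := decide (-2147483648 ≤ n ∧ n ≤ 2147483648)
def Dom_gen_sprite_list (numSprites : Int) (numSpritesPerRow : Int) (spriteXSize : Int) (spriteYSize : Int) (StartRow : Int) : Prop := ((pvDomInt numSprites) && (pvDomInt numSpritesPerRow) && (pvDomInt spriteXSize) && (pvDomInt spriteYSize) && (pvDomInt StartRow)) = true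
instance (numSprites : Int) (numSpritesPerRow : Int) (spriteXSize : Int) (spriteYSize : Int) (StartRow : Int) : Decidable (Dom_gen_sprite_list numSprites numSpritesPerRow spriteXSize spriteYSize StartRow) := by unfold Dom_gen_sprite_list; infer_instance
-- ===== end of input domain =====

-- B replaces A's stateful while-loop (row/column counters with a reset branch) by
-- a range comprehension computing each cell from its index with divmod (objective: simpler).

-- ===== PORT A =====
-- A's while-loop, step for step, with a fuel counter only to make the recursion total;
-- under Pre_ the fuel 2*numSprites+1 is never exhausted (the loop does at most
-- numSprites appends and at most numSprites row-resets).
def genSpriteLoopA (numSprites numSpritesPerRow spriteXSize spriteYSize : Int) :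
    Nat → Int → Int → Int → List (Int × Int × Int × Int) → List (Int × Int × Int × Int)
  | 0, _, _, _, acc => acc
  | fuel + 1, i, currRowOnSprite, currRow, acc =>
    if i < numSprites then
      if currRowOnSprite < numSpritesPerRow then
        genSpriteLoopA numSprites numSpritesPerRow spriteXSize spriteYSize fuel
          (i + 1) (currRowOnSprite + 1) currRow
          (acc ++ [(currRowOnSprite * spriteXSize, currRow * spriteYSize, spriteXSize, spriteYSize)])
      else
        genSpriteLoopA numSprites numSpritesPerRow spriteXSize spriteYSize fuel
          i 0 (currRow + 1) acc
    else acc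

def gen_sprite_list (numSprites : Int) (numSpritesPerRow : Int) (spriteXSize : Int) (spriteYSize : Int) (StartRow : Int) : List (Int × Int × Int × Int) :=
  genSpriteLoopA numSprites numSpritesPerRow spriteXSize spriteYSize
    (2 * numSprites.toNat + 1) 0 0 StartRow []

-- ===== PORT B =====
def gen_sprite_list_alt (numSprites : Int) (numSpritesPerRow : Int) (spriteXSize : Int) (spriteYSize : Int) (StartRow : Int) : List (Int × Int × Int × Int) :=
  (PySem.List.pyRange 0 numSprites 1).map (fun i =>
    (PySem.Int.mod i numSpritesPerRow * spriteXSize,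
     (StartRow + PySem.Int.floordiv i numSpritesPerRow) * spriteYSize,
     spriteXSize, spriteYSize))

-- ===== PRECONDITION & SPEC =====
-- Pre_ excludes numSprites > 0 with numSpritesPerRow ≤ 0: there A's while-loop never
-- terminates (it returns no value), while B raises ZeroDivisionError (perRow = 0) or returns.
def Pre_gen_sprite_list (numSprites : Int) (numSpritesPerRow : Int) (spriteXSize : Int) (spriteYSize : Int) (StartRow : Int) : Prop :=
  numSprites ≤ 0 ∨ 0 < numSpritesPerRow
instance (numSprites : Int) (numSpritesPerRow : Int) (spriteXSize : Int) (spriteYSize : Int) (StartRow : Int) : Decidable (Pre_gen_sprite_list numSprites numSpritesPerRow spriteXSize spriteYSize StartRow) := by unfold Pre_gen_sprite_list; infer_instance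
def pvWitness_gen_sprite_list : Int × Int × Int × Int × Int := (5, 2, 3, 4, 1)
def Spec_gen_sprite_list (numSprites : Int) (numSpritesPerRow : Int) (spriteXSize : Int) (spriteYSize : Int) (StartRow : Int) (out : List (Int × Int × Int × Int)) : Prop := out = gen_sprite_list_alt numSprites numSpritesPerRow spriteXSize spriteYSize StartRow
instance (numSprites : Int) (numSpritesPerRow : Int) (spriteXSize : Int) (spriteYSize : Int) (StartRow : Int) (out : List (Int × Int × Int × Int)) : Decidable (Spec_gen_sprite_list numSprites numSpritesPerRow spriteXSize spriteYSize StartRow out) := by unfold Spec_gen_sprite_list; infer_instance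

-- ===== CLAIM (what is proved, stated in full; the proofs are below) =====
def Claim_equal_gen_sprite_list : Prop := ∀ (numSprites : Int) (numSpritesPerRow : Int) (spriteXSize : Int) (spriteYSize : Int) (StartRow : Int), Dom_gen_sprite_list numSprites numSpritesPerRow spriteXSize spriteYSize StartRow → Pre_gen_sprite_list numSprites numSpritesPerRow spriteXSize spriteYSize StartRow → Spec_gen_sprite_list numSprites numSpritesPerRow spriteXSize spriteYSize StartRow (gen_sprite_list numSprites numSpritesPerRow spriteXSize spriteYSize StartRow)

-- ===== LEMMAS AND PROOFS =====

-- Loop invariant: from state (i, i % m, StartRow + i / m) with enough fuel, A's loop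
-- appends exactly the cells for indices i, i+1, …, numSprites-1 computed by divmod.
theorem genSpriteLoopA_eq (numSprites m X Y StartRow : Int) (hm : 0 < m) :
    ∀ (n fuel : Nat) (i : Int) (acc : List (Int × Int × Int × Int)),
      0 ≤ i → (numSprites - i).toNat ≤ n → 2 * n + 1 ≤ fuel →
      genSpriteLoopA numSprites m X Y fuel i (i % m) (StartRow + i / m) acc =
        acc ++ (PySem.List.pyRange i numSprites 1).map (fun j =>
          (PySem.Int.mod j m * X, (StartRow + PySem.Int.floordiv j m) * Y, X, Y)) := by
  intro n
  induction n with
  | zero =>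
    intro fuel i acc hi hn hfuel
    have hge : numSprites ≤ i := by omega
    obtain ⟨f, rfl⟩ : ∃ f, fuel = f + 1 := ⟨fuel - 1, by omega⟩
    rw [PySem.List.pyRange_one_eq_nil hge]
    simp [genSpriteLoopA, not_lt.mpr hge]
  | succ n ih =>
    intro fuel i acc hi hn hfuel
    by_cases hlt : i < numSprites
    · obtain ⟨f, rfl⟩ : ∃ f, fuel = f + 1 := ⟨fuel - 1, by omega⟩
      have hf : 2 * n + 2 ≤ f := by omega
      have hmodlt : i % m < m := Int.emod_lt_of_pos i hm
      have hmodnn : 0 ≤ i % m := Int.emod_nonneg i (by omega)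
      have hd : i % m + m * (i / m) = i := Int.emod_add_mul_ediv i m
      rw [PySem.List.pyRange_one_cons hlt]
      simp only [genSpriteLoopA, if_pos hlt, if_pos hmodlt, List.map_cons]
      have hcell : (PySem.Int.mod i m * X, (StartRow + PySem.Int.floordiv i m) * Y, X, Y)
          = ((i % m) * X, (StartRow + i / m) * Y, X, Y) := by
        rw [PySem.Int.mod_eq_emod_of_pos hm, PySem.Int.floordiv_eq_ediv_of_pos hm]
      by_cases hnext : i % m + 1 < m
      · -- same row: (i+1) % m = i % m + 1, (i+1) / m = i / m
        have hdm : (i + 1) / m = i / m ∧ (i + 1) % m = i % m + 1 :=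
          (Int.ediv_emod_unique hm).mpr ⟨by linarith, by omega, hnext⟩
        rw [show i % m + 1 = (i + 1) % m from hdm.2.symm,
            show StartRow + i / m = StartRow + (i + 1) / m by rw [hdm.1]]
        rw [ih f (i + 1) _ (by omega) (by omega) (by omega)]
        simp [hcell, hdm.1]
      · -- row boundary: i % m + 1 = m; A resets the column before the next append
        have heq : i % m + 1 = m := by omega
        have hdm : (i + 1) / m = i / m + 1 ∧ (i + 1) % m = 0 :=
          (Int.ediv_emod_unique hm).mpr ⟨by rw [mul_add, mul_one]; linarith, le_refl 0, hm⟩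
        rw [heq]
        by_cases hlt2 : i + 1 < numSprites
        · obtain ⟨f2, rfl⟩ : ∃ f2, f = f2 + 1 := ⟨f - 1, by omega⟩
          simp only [genSpriteLoopA, if_pos hlt2, if_neg (lt_irrefl m)]
          rw [show (0 : Int) = (i + 1) % m from hdm.2.symm,
              show StartRow + i / m + 1 = StartRow + (i + 1) / m by rw [hdm.1]; ring]
          rw [ih f2 (i + 1) _ (by omega) (by omega) (by omega)]
          simp [hcell]
        · obtain ⟨f2, rfl⟩ : ∃ f2, f = f2 + 1 := ⟨f - 1, by omega⟩
          rw [PySem.List.pyRange_one_eq_nil (by omega)]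
          simp [genSpriteLoopA, hlt2, hcell]
    · obtain ⟨f, rfl⟩ : ∃ f, fuel = f + 1 := ⟨fuel - 1, by omega⟩
      rw [PySem.List.pyRange_one_eq_nil (by omega)]
      simp [genSpriteLoopA, hlt]

-- ===== VERDICT (by name: the statement is the Claim_ definition above) =====
theorem gen_sprite_list_spec : Claim_equal_gen_sprite_list := by
  intro numSprites m X Y StartRow _ hpre
  unfold Spec_gen_sprite_list gen_sprite_list gen_sprite_list_alt
  rcases hpre with hns | hm
  · obtain ⟨f, hf⟩ : ∃ f, 2 * numSprites.toNat + 1 = f + 1 := ⟨2 * numSprites.toNat, rfl⟩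
    rw [hf, PySem.List.pyRange_one_eq_nil hns]
    simp [genSpriteLoopA, not_lt.mpr hns]
  · have h0 : (0 : Int) % m = 0 := Int.zero_emod m
    have h1 : (0 : Int) / m = 0 := Int.zero_ediv m
    have := genSpriteLoopA_eq numSprites m X Y StartRow hm numSprites.toNat
      (2 * numSprites.toNat + 1) 0 [] le_rfl (by omega) le_rfl
    rw [h0, h1, add_zero] at this
    simpa using this
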